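-- pv_equiv track=rewrite | github.com/caduobristo/dashboard | View.py | group_processes
-- ===== SOURCE A (Python) =====
-- def group_processes(processes):
--     grouped = {}
--     for pid, info in processes.items():
--         name = info['name']
--         if name not in grouped:
--             grouped[name] = []
--         grouped[name].append({'pid': pid, **info})
--     # Retorna os grupos ordenados alfabeticamente pelo nome do processo
--     return dict(sorted(grouped.items(), key=lambda x: x[0].lower()))
-- ===== SOURCE B (Python) =====
-- def group_processes(processes):
--     # Single pass: keep an association list of (name, entries) pairs, already
--     # ordered by name.lower(); new names are placed by ordered insertion
--     # (after all existing names with a <= lowered key), so no final sort is needed.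
--     grouped = []
--     for pid, info in processes.items():
--         name = info['name']
--         entry = {'pid': pid, **info}
--         for g in grouped:
--             if g[0] == name:
--                 g[1].append(entry)
--                 break
--         else:
--             i = 0
--             while i < len(grouped) and not name.lower() < grouped[i][0].lower():
--                 i += 1
--             grouped.insert(i, (name, [entry]))
--     return {name: entries for name, entries in grouped}
-- ===== Notes on version B (the rewrite author's own statement) =====
-- stated objective: alternative
-- what changed: A groups into a dict and sorts the groups afterwards; B makes a single pass that keeps an association list of groups permanently ordered by name.lower(), inserting each new name at its ordered position, so no trailing sort is needed.
import Mathlib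
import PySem

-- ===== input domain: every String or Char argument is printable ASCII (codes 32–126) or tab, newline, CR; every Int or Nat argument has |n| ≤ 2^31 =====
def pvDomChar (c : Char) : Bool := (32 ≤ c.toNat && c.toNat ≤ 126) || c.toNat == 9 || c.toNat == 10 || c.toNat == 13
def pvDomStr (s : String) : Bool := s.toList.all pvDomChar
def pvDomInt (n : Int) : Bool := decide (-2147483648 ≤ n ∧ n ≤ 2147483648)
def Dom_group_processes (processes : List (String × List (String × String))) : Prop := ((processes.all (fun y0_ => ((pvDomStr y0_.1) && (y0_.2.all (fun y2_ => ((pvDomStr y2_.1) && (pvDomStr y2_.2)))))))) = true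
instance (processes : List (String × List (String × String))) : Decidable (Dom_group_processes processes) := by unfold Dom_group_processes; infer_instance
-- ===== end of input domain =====

-- B replaces A's group-into-a-dict-then-sort with a single pass over an association
-- list of groups kept permanently ordered by name.lower() via ordered insertion.

-- shared transliterations of the identical Python expressions info['name'] and {'pid': pid, **info}
-- (info['name'] raises KeyError when absent; Pre_ excludes that, so the port's fallback is never read)
def pvName (info : List (String × String)) : String :=
  ((PySem.Dict.ofList info).get? "name").getD ""

def pvEntry (pid : String) (info : List (String × String)) : List (String × String) :=
  (PySem.Dict.ofList (("pid", pid) :: info)).items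

-- ===== PORT A =====
-- loop body of A: seed a fresh empty group when the name is new, then append the entry
def pvStepA (g : PySem.Dict String (List (List (String × String))))
    (pv : String × List (String × String)) : PySem.Dict String (List (List (String × String))) :=
  (if g.contains (pvName pv.2) then g else g.insert (pvName pv.2) []).insert (pvName pv.2)
    ((if g.contains (pvName pv.2) then g else g.insert (pvName pv.2) []).getD (pvName pv.2) [] ++ [pvEntry pv.1 pv.2])

def group_processes (processes : List (String × List (String × String))) : List (String × List (List (String × String))) :=
  let grouped := (PySem.Dict.ofList processes).items.foldl pvStepA PySem.Dict.empty
  (PySem.Dict.ofList (PySem.List.sorted grouped.items (fun x => PySem.Str.lower x.1))).items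

-- ===== PORT B =====
-- the for/break loop of B: append entry to the first group named n, none if there is no such group
def pvBump (n : String) (e : List (String × String)) :
    List (String × List (List (String × String))) → Option (List (String × List (List (String × String))))
  | [] => none
  | g :: rest =>
      if g.1 == n then some ((g.1, g.2 ++ [e]) :: rest)
      else (pvBump n e rest).map (g :: ·)

-- loop body of B: bump an existing group, else ordered insertion of a fresh group
-- (the while-loop insertion at the first index whose lowered key exceeds name.lower() is PySem.List.insertBy)
def pvStepB (acc : List (String × List (List (String × String))))
    (pv : String × List (String × String)) : List (String × List (List (String × String))) :=
  (pvBump (pvName pv.2) (pvEntry pv.1 pv.2) acc).getD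
    (PySem.List.insertBy (fun a b => decide (PySem.Str.lower a.1 < PySem.Str.lower b.1))
      (pvName pv.2, [pvEntry pv.1 pv.2]) acc)

def group_processes_alt (processes : List (String × List (String × String))) : List (String × List (List (String × String))) :=
  let grouped := (PySem.Dict.ofList processes).items.foldl pvStepB []
  (PySem.Dict.ofList grouped).items

-- ===== PRECONDITION & SPEC =====
-- Pre_ excludes exactly the inputs where info['name'] raises KeyError: some entry of the
-- dict built from `processes` has no 'name' key (shadowed duplicate pids do not count).
def Pre_group_processes (processes : List (String × List (String × String))) : Prop :=
  ∀ pv ∈ (PySem.Dict.ofList processes).items, "name" ∈ pv.2.map Prod.fst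
instance (processes : List (String × List (String × String))) : Decidable (Pre_group_processes processes) := by unfold Pre_group_processes; infer_instance

def pvWitness_group_processes : (List (String × List (String × String))) :=
  [("17", [("name", "chrome"), ("cpu", "3")]), ("4", [("name", "Bash")])]

def Spec_group_processes (processes : List (String × List (String × String))) (out : List (String × List (List (String × String)))) : Prop := out = group_processes_alt processes
instance (processes : List (String × List (String × String))) (out : List (String × List (List (String × String)))) : Decidable (Spec_group_processes processes out) := by unfold Spec_group_processes; infer_instance

-- ===== CLAIM (what is proved, stated in full; the proofs are below) =====
def Claim_equal_group_processes : Prop := ∀ (processes : List (String × List (String × String))), Dom_group_processes processes → Pre_group_processes processes → Spec_group_processes processes (group_processes processes)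

-- ===== LEMMAS AND PROOFS =====

-- abbreviations for the proofs
def pvK (p : String × List (List (String × String))) : String := PySem.Str.lower p.1
def pvBef (a b : String × List (List (String × String))) : Bool := decide (pvK a < pvK b)

lemma pvBef_eq : (fun (a b : String × List (List (String × String))) => decide (PySem.Str.lower a.1 < PySem.Str.lower b.1)) = pvBef := rfl

lemma pvBef_eq' : (fun (a b : String × List (List (String × String))) => decide (pvK a < pvK b)) = pvBef := rfl

-- A's grouped dict always has distinct keys
lemma pvNodupA (l : List (String × List (String × String))) :
    ((l.foldl pvStepA PySem.Dict.empty).keys).Nodup := by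
  suffices h : ∀ (d : PySem.Dict String (List (List (String × String)))), d.keys.Nodup →
      ((l.foldl pvStepA d).keys).Nodup by
    exact h _ (by simp [PySem.Dict.empty])
  induction l with
  | nil => intro d hd; simpa using hd
  | cons x t ih =>
      intro d hd
      simp only [List.foldl_cons]
      refine ih _ ?_
      unfold pvStepA
      split
      · exact PySem.Dict.nodup_keys_insert _ _ _ hd
      · exact PySem.Dict.nodup_keys_insert _ _ _ (PySem.Dict.nodup_keys_insert _ _ _ hd)

-- sorted of a one-element extension is ordered insertion into sorted
lemma pvSorted_append_singleton (l : List (String × List (List (String × String)))) (x : String × List (List (String × String))) :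
    PySem.List.sorted (l ++ [x]) pvK = PySem.List.insertBy pvBef x (PySem.List.sorted l pvK) := by
  rw [PySem.List.sorted_eq_foldl_insertBy, PySem.List.sorted_eq_foldl_insertBy, List.foldl_append]
  rfl

-- insertBy commutes with a first-component-preserving map
lemma pvInsertBy_map (f : (String × List (List (String × String))) → (String × List (List (String × String))))
    (hf : ∀ p, (f p).1 = p.1) (x : String × List (List (String × String)))
    (s : List (String × List (List (String × String)))) :
    PySem.List.insertBy pvBef (f x) (s.map f) = (PySem.List.insertBy pvBef x s).map f := by
  induction s with
  | nil => rfl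
  | cons y t ih =>
      simp only [List.map_cons, PySem.List.insertBy]
      have hb : pvBef (f x) (f y) = pvBef x y := by
        simp [pvBef, pvK, hf]
      rw [hb]
      split
      · simp
      · simp [ih]

-- sorted commutes with a first-component-preserving map
lemma pvSorted_map (f : (String × List (List (String × String))) → (String × List (List (String × String))))
    (hf : ∀ p, (f p).1 = p.1) (l : List (String × List (List (String × String)))) :
    PySem.List.sorted (l.map f) pvK = (PySem.List.sorted l pvK).map f := by
  rw [PySem.List.sorted_eq_foldl_insertBy, PySem.List.sorted_eq_foldl_insertBy, pvBef_eq']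
  suffices h : ∀ acc, (l.map f).foldl (fun acc x => PySem.List.insertBy pvBef x acc) (acc.map f)
      = ((l.foldl (fun acc x => PySem.List.insertBy pvBef x acc) acc).map f) by
    simpa using h []
  induction l with
  | nil => intro acc; rfl
  | cons y t ih =>
      intro acc
      simp only [List.map_cons, List.foldl_cons]
      rw [pvInsertBy_map f hf, ih]

-- pvBump on a list with distinct names containing n is the conditional map
lemma pvBump_eq_map (n : String) (e : List (String × String))
    (acc : List (String × List (List (String × String))))
    (hnd : (acc.map Prod.fst).Nodup) (hmem : n ∈ acc.map Prod.fst) :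
    pvBump n e acc = some (acc.map (fun p => if p.1 == n then (p.1, p.2 ++ [e]) else p)) := by
  induction acc with
  | nil => simp at hmem
  | cons g t ih =>
      simp only [List.map_cons, List.nodup_cons, List.mem_cons] at hnd hmem
      by_cases hg : g.1 = n
      · have ht : t.map (fun p => if p.1 = n then (p.1, p.2 ++ [e]) else p) = t := by
          refine List.map_congr_left ?_ |>.trans (List.map_id t)
          intro p hp
          have hne : p.1 ≠ n := by
            intro h
            exact hnd.1 (by rw [hg, ← h]; exact List.mem_map.mpr ⟨p, hp, rfl⟩)
          simp [hne]
        simp [pvBump, hg, ht]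
      · have hmem' : n ∈ t.map Prod.fst := by
          rcases hmem with h | h
          · exact absurd h.symm hg
          · exact h
        have := ih hnd.2 hmem'
        simp [pvBump, hg, this]

lemma pvBump_none (n : String) (e : List (String × String))
    (acc : List (String × List (List (String × String)))) (hmem : n ∉ acc.map Prod.fst) :
    pvBump n e acc = none := by
  induction acc with
  | nil => rfl
  | cons g t ih =>
      simp only [List.map_cons, List.mem_cons, not_or] at hmem
      simp [pvBump, Ne.symm hmem.1, ih hmem.2]

-- MAIN INVARIANT: B's running ordered list is the stable sort of A's grouped dict's items
lemma pvMain (l : List (String × List (String × String))) :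
    l.foldl pvStepB [] =
      PySem.List.sorted ((l.foldl pvStepA PySem.Dict.empty).items) (fun x => PySem.Str.lower x.1) := by
  induction l using List.reverseRecOn with
  | nil => rfl
  | append_singleton t x ih =>
      rw [List.foldl_append, List.foldl_append, List.foldl_cons, List.foldl_nil, List.foldl_cons, List.foldl_nil, ih]
      set g := t.foldl pvStepA PySem.Dict.empty with hg
      have hnd : g.keys.Nodup := pvNodupA t
      have hperm : (PySem.List.sorted g.items (fun x => PySem.Str.lower x.1)).Perm g.items :=
        PySem.List.sorted_perm _ _ _
      have hpermfst : ((PySem.List.sorted g.items (fun x => PySem.Str.lower x.1)).map Prod.fst).Perm (g.items.map Prod.fst) :=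
        hperm.map Prod.fst
      have hkeys : g.keys = g.items.map Prod.fst := rfl
      have hKeq : (fun (x : String × List (List (String × String))) => PySem.Str.lower x.1) = pvK := rfl
      by_cases hc : g.contains (pvName x.2) = true
      · -- existing name: both sides replace that group's list in place
        have hmem : pvName x.2 ∈ (PySem.List.sorted g.items (fun x => PySem.Str.lower x.1)).map Prod.fst := by
          refine hpermfst.mem_iff.mpr ?_
          rw [← hkeys]
          exact (PySem.Dict.contains_iff_mem_keys _ _).mp hc
        have hnds : ((PySem.List.sorted g.items (fun x => PySem.Str.lower x.1)).map Prod.fst).Nodup :=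
          (hkeys ▸ hnd).perm hpermfst.symm
        unfold pvStepB
        rw [pvBump_eq_map _ _ _ hnds hmem]
        unfold pvStepA
        simp only [hc, if_true]
        rw [PySem.Dict.items_insert_of_contains _ _ hc]
        have hmap : g.items.map (fun p => if (p.1 == pvName x.2) = true then (pvName x.2, g.getD (pvName x.2) [] ++ [pvEntry x.1 x.2]) else p)
            = g.items.map (fun p => if p.1 == pvName x.2 then (p.1, p.2 ++ [pvEntry x.1 x.2]) else p) := by
          refine List.map_congr_left ?_
          intro p hp
          by_cases hpn : p.1 == pvName x.2
          · have h1 : p.1 = pvName x.2 := by simpa using hpn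
            have h2 : g.getD (pvName x.2) [] = p.2 := by
              have : g.get? (pvName x.2) = some p.2 :=
                PySem.Dict.get?_of_mem_items g (h1 ▸ hp) hnd
              simp [PySem.Dict.getD, this]
            simp [h1, h2]
          · simp [hpn]
        rw [hmap]
        rw [hKeq, pvSorted_map (fun p => if p.1 == pvName x.2 then (p.1, p.2 ++ [pvEntry x.1 x.2]) else p)
          (by intro p; by_cases h : p.1 == pvName x.2 <;> simp [h])]
        rfl
      · -- fresh name: both sides insert the new singleton group at its ordered place
        have hc' : g.contains (pvName x.2) = false := by
          cases h : g.contains (pvName x.2) with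
          | true => exact absurd h hc
          | false => rfl
        have hmem : pvName x.2 ∉ (PySem.List.sorted g.items (fun x => PySem.Str.lower x.1)).map Prod.fst := by
          intro h
          exact hc ((PySem.Dict.contains_iff_mem_keys _ _).mpr (hkeys ▸ hpermfst.mem_iff.mp h))
        unfold pvStepB
        rw [pvBump_none _ _ _ hmem]
        unfold pvStepA
        simp only [hc', Bool.false_eq_true, if_false]
        rw [PySem.Dict.getD_insert_self, PySem.Dict.insert_insert_self,
          PySem.Dict.items_insert_of_not_contains _ _ hc']
        rw [hKeq, pvSorted_append_singleton, pvBef_eq]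
        simp [Option.getD]

-- ===== VERDICT (by name: the statement is the Claim_ definition above) =====
theorem group_processes_spec : Claim_equal_group_processes := by
  intro processes _ _
  unfold Spec_group_processes group_processes group_processes_alt
  rw [pvMain]
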